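-- pv_equiv track=rewrite | github.com/PabloMosUU/WordOrderBibles | word_pasting.py | replace_top_bigram
-- ===== SOURCE A (Python) =====
-- from collections import defaultdict, Counter
--
-- def join_words(verse: list, locations: list) -> list:
--     assert all([locations[i] > locations[i + 1] for i in range(len(locations) - 1)])
--     location_set = set(locations)
--     assert len(location_set) == len(locations)
--     joined = []
--     i = 0
--     while i < len(verse):
--         if i in location_set:
--             joined.append(verse[i] + ' ' + verse[i + 1])
--             i += 2
--         else:
--             joined.append(verse[i])
--             i += 1
--     return joined
--
-- def merge_positions(verses: list, positions: list) -> list: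
--     verse_locations = defaultdict(list)
--     for position in positions:
--         verse_locations[position[0]].append(position[1])
--     verse_locations = {verse: sorted(locations, reverse=True) for verse, locations in verse_locations.items()}
--     for verse_ix, locations in verse_locations.items():
--         verses[verse_ix] = join_words(verses[verse_ix], locations)
--     return verses
--
-- def replace_top_bigram(verses: list) -> list:
--     bigram_positions = defaultdict(list)
--     for j, verse in enumerate(verses):
--         for i, word in enumerate(verse[:-1]):
--             bigram_positions[word + ' ' + verse[i + 1]].append((j, i))
--     # Now the bigram with the longest list of positions is the most frequent bigram
--     if not bigram_positions:
--         return []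
--     top_bigram = max(bigram_positions, key=lambda x: len(bigram_positions[x]))
--     return merge_positions(verses, bigram_positions[top_bigram])
-- ===== SOURCE B (Python) =====
-- from collections import defaultdict, Counter
--
--
-- def join_words(verse: list, locations: list) -> list:
--     assert all([locations[i] > locations[i + 1] for i in range(len(locations) - 1)])
--     location_set = set(locations)
--     assert len(location_set) == len(locations)
--     joined = []
--     i = 0
--     while i < len(verse):
--         if i in location_set:
--             joined.append(verse[i] + ' ' + verse[i + 1])
--             i += 2
--         else:
--             joined.append(verse[i])
--             i += 1
--     return joined
--
--
-- def merge_positions(verses: list, positions: list) -> list: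
--     verse_locations = defaultdict(list)
--     for position in positions:
--         verse_locations[position[0]].append(position[1])
--     verse_locations = {verse: sorted(locations, reverse=True) for verse, locations in verse_locations.items()}
--     for verse_ix, locations in verse_locations.items():
--         verses[verse_ix] = join_words(verses[verse_ix], locations)
--     return verses
--
--
-- def replace_top_bigram(verses: list) -> list:
--     # Pass 1: count bigrams only (no positions stored).
--     counts = Counter(w1 + ' ' + w2 for verse in verses for w1, w2 in zip(verse, verse[1:]))
--     if not counts:
--         return []
--     top = max(counts, key=counts.get)
--     # Pass 2: collect positions of the top bigram only.
--     positions = [(j, i) for j, verse in enumerate(verses)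
--                  for i in range(len(verse) - 1)
--                  if verse[i] + ' ' + verse[i + 1] == top]
--     return merge_positions(verses, positions)
-- ===== Notes on version B (the rewrite author's own statement) =====
-- stated objective: alternative
-- what changed: A builds one dict mapping every bigram to its full position list and maxes over list lengths; B counts bigrams with a Counter in one pass, picks the top bigram, then rescans the verses to collect only that bigram's positions (same merge step).
import Mathlib
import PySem

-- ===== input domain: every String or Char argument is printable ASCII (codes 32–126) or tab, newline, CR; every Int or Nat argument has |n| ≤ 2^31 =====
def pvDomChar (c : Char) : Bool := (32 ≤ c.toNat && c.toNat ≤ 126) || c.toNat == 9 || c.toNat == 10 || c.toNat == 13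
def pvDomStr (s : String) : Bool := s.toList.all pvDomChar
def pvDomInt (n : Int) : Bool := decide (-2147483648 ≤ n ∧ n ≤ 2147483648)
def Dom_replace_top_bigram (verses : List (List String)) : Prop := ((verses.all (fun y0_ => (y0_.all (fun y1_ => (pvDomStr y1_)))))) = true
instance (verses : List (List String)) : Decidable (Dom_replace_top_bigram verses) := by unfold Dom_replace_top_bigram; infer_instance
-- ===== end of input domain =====

-- B replaces A's dict-of-all-position-lists by a bigram Counter plus a second scan that
-- collects only the top bigram's positions (objective: alternative decomposition, same cost).
-- Both A and B mutate the input list in place via the shared merge_positions; the side effects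
-- are identical and the theorems below are about the return value.

-- ===== PORT A =====
-- join_words / merge_positions are verbatim-identical helpers in Source A and Source B; ported once, used by both ports.
-- join_words: the Python asserts hold on every reachable call (locations strictly decreasing, distinct) and are not ported.
-- The while-loop with its skipping index i is ported as recursion on the remaining length.
def join_words_go (verse : List String) (lset : PySem.Set Int) (i : Nat) : List String :=
  if h : i < verse.length then
    if PySem.Set.contains lset (i : Int) then
      -- verse[i + 1]: in every reachable call i+1 < len(verse); pyGetD's default is never read there
      (verse[i] ++ " " ++ PySem.List.pyGetD verse ((i : Int) + 1) "") :: join_words_go verse lset (i + 2)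
    else
      verse[i] :: join_words_go verse lset (i + 1)
  else []
termination_by verse.length - i

def join_words (verse : List String) (locations : List Int) : List String :=
  join_words_go verse (PySem.Set.ofList locations) 0

def merge_positions (verses : List (List String)) (positions : List (Int × Int)) : List (List String) :=
  let verse_locations : PySem.Dict Int (List Int) :=
    positions.foldl (fun d p => d.modify p.1 [] (fun l => l ++ [p.2])) PySem.Dict.empty
  let verse_locations2 : PySem.Dict Int (List Int) :=
    PySem.Dict.mk (verse_locations.items.map (fun kv => (kv.1, PySem.List.sorted kv.2 (fun x => x) true)))
  -- verses[verse_ix] = join_words(verses[verse_ix], locations): verse_ix is always in range here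
  verse_locations2.items.foldl
    (fun vs kv => PySem.List.pySetD vs kv.1 (join_words (PySem.List.pyGetD vs kv.1 []) kv.2)) verses

def replace_top_bigram (verses : List (List String)) : List (List String) :=
  let bigram_positions : PySem.Dict String (List (Int × Int)) :=
    (PySem.List.enumerate verses).foldl (fun d jv =>
      (PySem.List.enumerate (PySem.List.slice jv.2 none (some (-1)))).foldl (fun d iw =>
        d.modify (iw.2 ++ " " ++ PySem.List.pyGetD jv.2 (iw.1 + 1) "") [] (fun l => l ++ [(jv.1, iw.1)])) d)
      PySem.Dict.empty
  if bigram_positions.items = [] then []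
  else
    match PySem.List.max? bigram_positions.keys (fun k => ((bigram_positions.getD k []).length : Int)) with
    | none => []  -- unreachable: keys nonempty (totality guard for max over a nonempty dict)
    | some top_bigram => merge_positions verses (bigram_positions.getD top_bigram [])

-- ===== PORT B =====
def replace_top_bigram_alt (verses : List (List String)) : List (List String) :=
  let counts : PySem.Dict String Int :=
    PySem.Dict.counter (verses.flatMap (fun verse =>
      (verse.zip (PySem.List.slice verse (some 1) none)).map (fun p => p.1 ++ " " ++ p.2)))
  if counts.items = [] then []
  else
    match PySem.List.max? counts.keys (fun k => counts.getD k 0) with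
    | none => []  -- unreachable: keys nonempty (totality guard for max over a nonempty dict)
    | some top =>
      let positions : List (Int × Int) :=
        (PySem.List.enumerate verses).foldl (fun acc jv =>
          acc ++ ((PySem.List.pyRange 0 ((jv.2.length : Int) - 1)).filter (fun i =>
            PySem.List.pyGetD jv.2 i "" ++ " " ++ PySem.List.pyGetD jv.2 (i + 1) "" == top)).map
            (fun i => (jv.1, i))) []
      merge_positions verses positions

-- ===== PRECONDITION & SPEC =====
def Spec_replace_top_bigram (verses : List (List String)) (out : List (List String)) : Prop := out = replace_top_bigram_alt verses
instance (verses : List (List String)) (out : List (List String)) : Decidable (Spec_replace_top_bigram verses out) := by unfold Spec_replace_top_bigram; infer_instance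

-- ===== CLAIM (what is proved, stated in full; the proofs are below) =====
def Claim_equal_replace_top_bigram : Prop := ∀ (verses : List (List String)), Dom_replace_top_bigram verses → Spec_replace_top_bigram verses (replace_top_bigram verses)

-- ===== LEMMAS AND PROOFS =====

-- The flattened (bigram, position) stream both programs traverse, verse by verse.
def pvPairs (verses : List (List String)) : List (String × (Int × Int)) :=
  (PySem.List.enumerate verses).flatMap (fun jv =>
    (PySem.List.enumerate (PySem.List.slice jv.2 none (some (-1)))).map
      (fun iw => (iw.2 ++ " " ++ PySem.List.pyGetD jv.2 (iw.1 + 1) "", (jv.1, iw.1))))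

theorem pvA_dict_eq (verses : List (List String)) :
    (PySem.List.enumerate verses).foldl (fun d jv =>
      (PySem.List.enumerate (PySem.List.slice jv.2 none (some (-1)))).foldl (fun d iw =>
        d.modify (iw.2 ++ " " ++ PySem.List.pyGetD jv.2 (iw.1 + 1) "") [] (fun l => l ++ [(jv.1, iw.1)])) d)
      PySem.Dict.empty
    = (pvPairs verses).foldl (fun d p => d.modify p.1 [] (fun l => l ++ [p.2])) PySem.Dict.empty := by
  rw [pvPairs, List.foldl_flatMap]
  apply PySem.List.foldl_congr_mem
  intro d jv _
  rw [List.foldl_map]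

theorem pvVerseBigrams (v : List String) :
    (v.zip (PySem.List.slice v (some 1) none)).map (fun p => p.1 ++ " " ++ p.2)
    = (PySem.List.enumerate (PySem.List.slice v none (some (-1)))).map
        (fun iw => iw.2 ++ " " ++ PySem.List.pyGetD v (iw.1 + 1) "") := by
  have h1 : PySem.List.slice v (some 1) none = v.drop 1 := by
    simpa using PySem.List.slice_from_natCast v 1
  have h2 : PySem.List.slice v none (some (-1)) = v.dropLast := by simp [pysem]
  rw [h1, h2]
  apply List.ext_getElem
  · simp [List.length_dropLast, PySem.List.length_enumerate]
  · intro k hk1 hk2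
    simp only [List.getElem_map, List.getElem_zip, PySem.List.getElem_enumerate, List.getElem_drop,
      List.getElem_dropLast]
    have hklen : k + 1 < v.length := by
      simp [PySem.List.length_enumerate, List.length_dropLast] at hk2; omega
    have : ((0 : Int) + (k : Int)) + 1 = ((k + 1 : Nat) : Int) := by push_cast; ring
    rw [this, PySem.List.pyGetD_natCast]
    simp [List.getD_eq_getElem?_getD, List.getElem?_eq_getElem hklen]
    congr 1
    omega

theorem pvBigrams_eq (verses : List (List String)) :
    verses.flatMap (fun verse =>
      (verse.zip (PySem.List.slice verse (some 1) none)).map (fun p => p.1 ++ " " ++ p.2))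
    = (pvPairs verses).map (fun p => p.1) := by
  rw [pvPairs, List.map_flatMap]
  conv_lhs => rw [← PySem.List.map_snd_enumerate verses 0, List.flatMap_map]
  apply List.flatMap_congr
  intro jv _
  rw [pvVerseBigrams, List.map_map]
  rfl

theorem pvVersePositions (v : List String) (j : Int) (top : String) :
    ((PySem.List.pyRange 0 ((v.length : Int) - 1)).filter (fun i =>
       PySem.List.pyGetD v i "" ++ " " ++ PySem.List.pyGetD v (i + 1) "" == top)).map (fun i => (j, i))
    = (((PySem.List.enumerate (PySem.List.slice v none (some (-1)))).map
         (fun iw => (iw.2 ++ " " ++ PySem.List.pyGetD v (iw.1 + 1) "", (j, iw.1)))).filter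
         (fun p => p.1 == top)).map (fun p => p.2) := by
  have h2 : PySem.List.slice v none (some (-1)) = v.dropLast := by simp [pysem]
  rw [h2, PySem.List.enumerate_eq_map_pyRange v.dropLast "", List.map_map, List.filter_map,
    List.map_map]
  have hr : PySem.List.pyRange 0 (PySem.List.len v.dropLast) = PySem.List.pyRange 0 ((v.length : Int) - 1) := by
    cases v with
    | nil => rfl
    | cons a t =>
      simp only [PySem.List.len, List.length_dropLast, List.length_cons]
      congr 1
      omega
  rw [hr]
  symm
  rw [List.filter_congr (q := fun i =>
       PySem.List.pyGetD v i "" ++ " " ++ PySem.List.pyGetD v (i + 1) "" == top) ?_]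
  · rfl
  · intro i hi
    rw [PySem.List.mem_pyRange_one] at hi
    simp only [Function.comp]
    have hnat : i = ((i.toNat : Nat) : Int) := by omega
    have hlt : i.toNat < v.length - 1 := by omega
    have : PySem.List.pyGetD v.dropLast i "" = PySem.List.pyGetD v i "" := by
      rw [hnat, PySem.List.pyGetD_natCast, PySem.List.pyGetD_natCast]
      have hd : i.toNat < v.dropLast.length := by simp [List.length_dropLast]; omega
      rw [List.getD_eq_getElem?_getD, List.getD_eq_getElem?_getD,
        List.getElem?_eq_getElem hd, List.getElem?_eq_getElem (by omega : i.toNat < v.length)]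
      simp [List.getElem_dropLast]
    rw [this]

theorem pvPositions_eq (verses : List (List String)) (top : String) :
    (PySem.List.enumerate verses).foldl (fun acc jv =>
      acc ++ ((PySem.List.pyRange 0 ((jv.2.length : Int) - 1)).filter (fun i =>
        PySem.List.pyGetD jv.2 i "" ++ " " ++ PySem.List.pyGetD jv.2 (i + 1) "" == top)).map
        (fun i => (jv.1, i))) []
    = ((pvPairs verses).filter (fun p => p.1 == top)).map (fun p => p.2) := by
  rw [PySem.List.foldl_append_eq_flatMap, List.nil_append, pvPairs, List.filter_flatMap,
    List.map_flatMap]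
  apply List.flatMap_congr
  intro jv _
  rw [pvVersePositions jv.2 jv.1 top, List.filter_map]

theorem max?_congr_mem_aux {α κ : Type} [LT κ] [DecidableLT κ] (f g : α → κ) (xs : List α)
    (acc : Option α) (hacc : ∀ x, acc = some x → f x = g x) (h : ∀ x ∈ xs, f x = g x) :
    xs.foldl (fun acc x => match acc with
      | none => some x
      | some m => if f m < f x then some x else some m) acc
    = xs.foldl (fun acc x => match acc with
      | none => some x
      | some m => if g m < g x then some x else some m) acc := by
  induction xs generalizing acc with
  | nil => rfl
  | cons y ys ih =>
    have hy : f y = g y := h y (by simp)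
    have hys : ∀ x ∈ ys, f x = g x := fun x hx => h x (by simp [hx])
    cases acc with
    | none =>
      simp only [List.foldl_cons]
      apply ih
      · intro x hx
        cases hx
        exact hy
      · exact hys
    | some m =>
      have hm : f m = g m := hacc m rfl
      simp only [List.foldl_cons, hm, hy]
      apply ih
      · intro x hx
        split at hx <;> cases hx
        · exact hy
        · exact hm
      · exact hys

theorem max?_congr_mem {α κ : Type} [LT κ] [DecidableLT κ] (xs : List α) (f g : α → κ)
    (h : ∀ x ∈ xs, f x = g x) : PySem.List.max? xs f = PySem.List.max? xs g := by
  unfold PySem.List.max?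
  exact max?_congr_mem_aux f g xs none (by simp) h

theorem pv_items_nil_iff {κ ν : Type} [BEq κ] (d : PySem.Dict κ ν) : d.items = [] ↔ d.keys = [] := by
  simp [PySem.Dict.keys]

-- ===== VERDICT (by name: the statement is the Claim_ definition above) =====
theorem replace_top_bigram_spec : Claim_equal_replace_top_bigram := by
  intro verses _
  unfold Spec_replace_top_bigram
  show replace_top_bigram verses = replace_top_bigram_alt verses
  rw [replace_top_bigram, replace_top_bigram_alt]
  rw [pvA_dict_eq, pvBigrams_eq]
  set P := pvPairs verses with hP
  set dA := P.foldl (fun d p => d.modify p.1 [] (fun l => l ++ [p.2])) PySem.Dict.empty with hdA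
  set counts := PySem.Dict.counter (κ := String) (P.map (fun p => p.1)) with hcounts
  have hkeys : dA.keys = counts.keys := by
    rw [hdA, hcounts, PySem.Dict.keys_foldl_modify_key, PySem.Dict.keys_counter]
    simp [pysem, PySem.Set.update, PySem.Set.ofList_eq_foldl]
  have hgetD : ∀ k, dA.getD k [] = (P.filter (fun p => p.1 == k)).map (fun p => p.2) := by
    intro k
    rw [hdA, PySem.Dict.getD_foldl_modify_append]
    simp
  have hcount : ∀ k, ((dA.getD k []).length : Int) = counts.getD k 0 := by
    intro k
    rw [hgetD, hcounts, PySem.Dict.getD_counter]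
    have : (List.map (fun p => p.1) P).count k = (P.filter (fun p => p.1 == k)).length := by
      rw [List.count_eq_countP, List.countP_map, List.countP_eq_length_filter]
      rfl
    rw [this]
    simp
  have hempty : (dA.items = []) ↔ (counts.items = []) := by
    rw [pv_items_nil_iff, pv_items_nil_iff, hkeys]
  have hmax : PySem.List.max? dA.keys (fun k => ((dA.getD k []).length : Int))
      = PySem.List.max? counts.keys (fun k => counts.getD k 0) := by
    rw [hkeys]
    exact max?_congr_mem _ _ _ (fun k _ => hcount k)
  by_cases h1 : dA.items = []
  · rw [if_pos h1, if_pos (hempty.mp h1)]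
  · rw [if_neg h1, if_neg (fun hc => h1 (hempty.mpr hc)), hmax]
    cases PySem.List.max? counts.keys (fun k => counts.getD k 0) with
    | none => rfl
    | some top =>
      dsimp only
      rw [hgetD top, pvPositions_eq]
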